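-- pv_equiv track=rewrite | github.com/thierryxdp/TCC | problems/820/solution_103403.py | posLetra
-- ===== SOURCE A (Python) =====
-- def posLetra(string, letra, numero):
--     '''Esta função retorna em que posição da string aquela ocorrencia
--     de letra está. Caso exista menos ocorrenciass da letra do que a
--     ocorrencia pedida, a função deve retornar -1.
--     str, str, int >>>  '''
--     ocorrencias = 0
--     i = 0
--
--     while i < len(string):
--         if string[i] == letra:
--             ocorrencias += 1
--         i += 1
--         if ocorrencias == numero:
--             return i
-- ===== SOURCE B (Python) =====
-- def posLetra(string, letra, numero):
--     # B: return the smallest i in 1..len(string) whose prefix string[:i]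
--     # contains exactly `numero` characters equal to letra; None otherwise.
--     for i in range(1, len(string) + 1):
--         if sum(1 for c in string[:i] if c == letra) == numero:
--             return i
--     return None
-- ===== Notes on version B (the rewrite author's own statement) =====
-- stated objective: alternative
-- what changed: Replaces A's single incremental-counter while-loop by a search for the smallest prefix length whose prefix recounted from scratch contains exactly numero matches.
import Mathlib
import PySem

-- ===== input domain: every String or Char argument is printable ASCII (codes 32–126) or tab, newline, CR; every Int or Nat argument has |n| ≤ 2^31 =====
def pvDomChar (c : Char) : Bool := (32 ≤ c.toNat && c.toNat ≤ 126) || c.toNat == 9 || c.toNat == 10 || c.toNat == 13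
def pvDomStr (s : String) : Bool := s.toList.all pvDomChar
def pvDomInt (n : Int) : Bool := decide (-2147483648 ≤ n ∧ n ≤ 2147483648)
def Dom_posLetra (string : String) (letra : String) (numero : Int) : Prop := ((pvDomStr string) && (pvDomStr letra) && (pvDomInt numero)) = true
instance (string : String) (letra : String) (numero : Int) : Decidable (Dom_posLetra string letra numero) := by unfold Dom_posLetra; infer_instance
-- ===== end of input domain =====

-- B replaces A's incremental-counter loop by a smallest-matching-prefix search (recounting each prefix); return values proved equal on all inputs.

-- ===== PORT A =====
-- A's while-loop: state (ocorrencias, i); each step compares string[i] with letra,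
-- bumps the counter, bumps i, and returns i as soon as the counter equals numero.
def posLetraLoop (chars : List Char) (letra : String) (numero : Int)
    (ocorrencias : Int) (i : Nat) : Option Int :=
  if h : i < chars.length then
    let ocorrencias' := if String.mk [chars[i]] = letra then ocorrencias + 1 else ocorrencias
    if ocorrencias' = numero then some ((i : Int) + 1)
    else posLetraLoop chars letra numero ocorrencias' (i + 1)
  else none
termination_by chars.length - i

def posLetra (string : String) (letra : String) (numero : Int) : Option Int :=
  posLetraLoop string.toList letra numero 0 0

-- ===== PORT B =====
-- Source B: sum(1 for c in string[:i] if c == letra)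
def prefCount (chars : List Char) (letra : String) (i : Nat) : Int :=
  ((chars.take i).countP (fun c => String.mk [c] = letra) : Nat)

-- Source B: for i in range(1, len(string)+1): …
def posLetraAltLoop (chars : List Char) (letra : String) (numero : Int) (i : Nat) : Option Int :=
  if i ≤ chars.length then
    if prefCount chars letra i = numero then some (i : Int)
    else posLetraAltLoop chars letra numero (i + 1)
  else none
termination_by chars.length + 1 - i

def posLetra_alt (string : String) (letra : String) (numero : Int) : Option Int :=
  posLetraAltLoop string.toList letra numero 1

-- ===== PRECONDITION & SPEC =====
def Spec_posLetra (string : String) (letra : String) (numero : Int) (out : Option Int) : Prop := out = posLetra_alt string letra numero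
instance (string : String) (letra : String) (numero : Int) (out : Option Int) : Decidable (Spec_posLetra string letra numero out) := by unfold Spec_posLetra; infer_instance

-- ===== CLAIM (what is proved, stated in full; the proofs are below) =====
def Claim_equal_posLetra : Prop := ∀ (string : String) (letra : String) (numero : Int), Dom_posLetra string letra numero → Spec_posLetra string letra numero (posLetra string letra numero)

-- ===== LEMMAS AND PROOFS =====

lemma prefCount_succ (chars : List Char) (letra : String) (i : Nat) (h : i < chars.length) :
    prefCount chars letra (i + 1) =
      (if String.mk [chars[i]] = letra then prefCount chars letra i + 1 else prefCount chars letra i) := by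
  unfold prefCount
  rw [List.take_succ, List.getElem?_eq_getElem h]
  simp only [Option.toList_some, List.countP_append, List.countP_cons, List.countP_nil]
  by_cases hc : String.mk [chars[i]] = letra <;> simp [hc]

lemma loop_eq (chars : List Char) (letra : String) (numero : Int) :
    ∀ k i, i + k = chars.length →
      posLetraLoop chars letra numero (prefCount chars letra i) i =
        posLetraAltLoop chars letra numero (i + 1) := by
  intro k
  induction k with
  | zero =>
    intro i hi
    rw [posLetraLoop, posLetraAltLoop]
    simp [Nat.add_zero] at hi
    simp [hi]
  | succ k ih =>
    intro i hi
    have hlt : i < chars.length := by omega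
    rw [posLetraLoop, posLetraAltLoop]
    simp only [hlt, dif_pos]
    have hle : i + 1 ≤ chars.length := hlt
    rw [if_pos hle, ← prefCount_succ chars letra i hlt]
    by_cases hc : prefCount chars letra (i + 1) = numero
    · simp [hc]
    · simp only [hc, if_neg, if_false]
      have := ih (i + 1) (by omega)
      simpa using this

lemma prefCount_zero (chars : List Char) (letra : String) : prefCount chars letra 0 = 0 := by
  simp [prefCount]

-- ===== VERDICT (by name: the statement is the Claim_ definition above) =====
theorem posLetra_spec : Claim_equal_posLetra := by
  intro string letra numero _
  unfold Spec_posLetra posLetra posLetra_alt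
  have := loop_eq string.toList letra numero string.toList.length 0 (by omega)
  rw [prefCount_zero] at this
  simpa using this
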